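-- pv_equiv track=rewrite | github.com/artsdata-stewards/artsdata-actions | tests/utils.py | replace_federated_service_call
-- ===== SOURCE A (Python) =====
-- def replace_federated_service_call(sparql_text: str, replacement_text: str) -> str:
--     """
--     Replace a federated SERVICE call with stub data.
--
--     This function finds a SERVICE <https://query.wikidata.org/sparql> block
--     and replaces it with the provided replacement text. This allows testing
--     SPARQL queries without making actual federated queries.
--
--     Args:
--         sparql_text: The SPARQL query text containing a SERVICE call
--         replacement_text: The text to replace the SERVICE block with
--
--     Returns:
--         The modified SPARQL query text
--     """
--     start_tag = 'SERVICE <https://query.wikidata.org/sparql>'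
--     start_pos = sparql_text.find(start_tag)
--
--     if start_pos == -1:
--         return sparql_text
--
--     # Find the opening brace of the SERVICE block
--     service_start = sparql_text.find('{', start_pos)
--     if service_start == -1:
--         return sparql_text
--
--     # Find the matching closing brace
--     depth = 1
--     i = service_start + 1
--
--     while i < len(sparql_text) and depth > 0:
--         char = sparql_text[i]
--         if char == '{':
--             depth += 1
--         elif char == '}':
--             depth -= 1
--         i += 1
--
--     if depth == 0:
--         # Found the matching closing brace
--         # Replace the entire SERVICE block (including SERVICE keyword and braces)
--         return sparql_text[:start_pos] + replacement_text + sparql_text[i:]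
--
--     # No matching closing brace found
--     return sparql_text
-- ===== SOURCE B (Python) =====
-- def replace_federated_service_call(sparql_text: str, replacement_text: str) -> str:
--     """Replace a federated SERVICE call with stub data (find-jump brace matcher)."""
--     start_tag = 'SERVICE <https://query.wikidata.org/sparql>'
--     start_pos = sparql_text.find(start_tag)
--     if start_pos == -1:
--         return sparql_text
--     service_start = sparql_text.find('{', start_pos)
--     if service_start == -1:
--         return sparql_text
--     depth = 1
--     i = service_start + 1
--     while depth > 0:
--         next_close = sparql_text.find('}', i)
--         if next_close == -1:
--             # unmatched block: leave the query untouched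
--             return sparql_text
--         next_open = sparql_text.find('{', i)
--         if next_open != -1 and next_open < next_close:
--             depth += 1
--             i = next_open + 1
--         else:
--             depth -= 1
--             i = next_close + 1
--     return sparql_text[:start_pos] + replacement_text + sparql_text[i:]
-- ===== Notes on version B (the rewrite author's own statement) =====
-- stated objective: alternative
-- what changed: A scans the SERVICE block character by character maintaining a depth counter; B jumps between brace positions using str.find for the next '{' and '}' and compares their positions to update the depth, never inspecting the characters in between.
import Mathlib
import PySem

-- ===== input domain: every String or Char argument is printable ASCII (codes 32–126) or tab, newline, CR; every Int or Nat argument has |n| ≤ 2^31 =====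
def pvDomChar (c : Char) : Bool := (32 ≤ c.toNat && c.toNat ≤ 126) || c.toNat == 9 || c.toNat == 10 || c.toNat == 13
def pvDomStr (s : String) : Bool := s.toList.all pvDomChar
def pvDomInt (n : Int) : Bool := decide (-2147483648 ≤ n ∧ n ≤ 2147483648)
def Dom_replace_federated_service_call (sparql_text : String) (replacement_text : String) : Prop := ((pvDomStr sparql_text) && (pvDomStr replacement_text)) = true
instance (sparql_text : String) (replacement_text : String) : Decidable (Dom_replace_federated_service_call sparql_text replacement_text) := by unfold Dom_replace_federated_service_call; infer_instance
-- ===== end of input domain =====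

-- B replaces A's char-by-char depth scan by a find-jump brace matcher (jump to the next
-- '{' / '}' via find and compare positions); objective: alternative decomposition, same result.

-- ===== PORT A =====
def pvTag : List Char := "SERVICE <https://query.wikidata.org/sparql>".toList

-- A's while loop: "while i < len and depth > 0: char = s[i]; …; i += 1", transcribed as
-- structural recursion on the remaining suffix s[i:]; returns (final depth, s[i:] at exit).
def pvALoop (cs : List Char) (depth : Int) : Int × List Char :=
  if depth ≤ 0 then (depth, cs)
  else
    match cs with
    | [] => (depth, [])
    | c :: rest =>
        pvALoop rest (if c = '{' then depth + 1 else if c = '}' then depth - 1 else depth)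

def replace_federated_service_call (sparql_text : String) (replacement_text : String) : String :=
  let cs := sparql_text.toList
  let start_pos := PySem.Chars.find cs pvTag
  if start_pos = -1 then sparql_text
  else
    -- sparql_text.find('{', start_pos): find with a start index, ported via Chars.findFrom (exact)
    let service_start := PySem.Chars.findFrom cs ['{'] start_pos
    if service_start = -1 then sparql_text
    else
      let res := pvALoop (cs.drop (service_start.toNat + 1)) 1
      if res.1 = 0 then
        -- sparql_text[:start_pos] + replacement_text + sparql_text[i:]
        String.ofList (cs.take start_pos.toNat ++ replacement_text.toList ++ res.2)
      else sparql_text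

-- ===== PORT B =====
-- B's while loop: text.find('}', i) / text.find('{', i) ported on the suffix s[i:]
-- (text.find(c, i) finds the same first occurrence as find on the dropped suffix — exact);
-- returns some (s[i:] at exit) when depth reached 0, none when no '}' was left.
def pvBLoop (cs : List Char) (depth : Int) : Option (List Char) :=
  if depth ≤ 0 then some cs
  else
    let next_close := PySem.Chars.find cs ['}']
    if hc : next_close = -1 then none
    else
      let next_open := PySem.Chars.find cs ['{']
      if next_open ≠ -1 ∧ next_open < next_close then
        pvBLoop (cs.drop (next_open.toNat + 1)) (depth + 1)
      else
        pvBLoop (cs.drop (next_close.toNat + 1)) (depth - 1)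
termination_by cs.length
decreasing_by
  · have h1 : ['}'] <:+: cs := by
      have := (PySem.Chars.find_eq_neg_one_iff cs ['}']).not_left
      simpa [hc] using this.mp hc
    have h2 : cs ≠ [] := by rintro rfl; simpa using h1.sublist
    simp only [List.length_drop]
    have : 0 < cs.length := List.length_pos_iff.mpr h2
    omega
  · have h1 : ['}'] <:+: cs := by
      have := (PySem.Chars.find_eq_neg_one_iff cs ['}']).not_left
      simpa [hc] using this.mp hc
    have h2 : cs ≠ [] := by rintro rfl; simpa using h1.sublist
    simp only [List.length_drop]
    have : 0 < cs.length := List.length_pos_iff.mpr h2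
    omega

def replace_federated_service_call_alt (sparql_text : String) (replacement_text : String) : String :=
  let cs := sparql_text.toList
  let start_pos := PySem.Chars.find cs pvTag
  if start_pos = -1 then sparql_text
  else
    let service_start := PySem.Chars.findFrom cs ['{'] start_pos
    if service_start = -1 then sparql_text
    else
      match pvBLoop (cs.drop (service_start.toNat + 1)) 1 with
      | some suffix =>
          String.ofList (cs.take start_pos.toNat ++ replacement_text.toList ++ suffix)
      | none => sparql_text

-- ===== PRECONDITION & SPEC =====
def Spec_replace_federated_service_call (sparql_text : String) (replacement_text : String) (out : String) : Prop := out = replace_federated_service_call_alt sparql_text replacement_text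
instance (sparql_text : String) (replacement_text : String) (out : String) : Decidable (Spec_replace_federated_service_call sparql_text replacement_text out) := by unfold Spec_replace_federated_service_call; infer_instance

-- ===== CLAIM (what is proved, stated in full; the proofs are below) =====
def Claim_equal_replace_federated_service_call : Prop := ∀ (sparql_text : String) (replacement_text : String), Dom_replace_federated_service_call sparql_text replacement_text → Spec_replace_federated_service_call sparql_text replacement_text (replace_federated_service_call sparql_text replacement_text)

-- ===== LEMMAS AND PROOFS =====

-- Characterisation of find for a single-character needle: it points at the first occurrence.
lemma pv_find_char_spec (cs : List Char) (c : Char)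
    (h : PySem.Chars.find cs [c] ≠ -1) :
    cs[(PySem.Chars.find cs [c]).toNat]? = some c ∧
      ∀ i < (PySem.Chars.find cs [c]).toNat, cs[i]? ≠ some c := by
  have hnn : 0 ≤ PySem.Chars.find cs [c] := by
    have := PySem.Chars.neg_one_le_find cs [c]; omega
  obtain ⟨hpre, hmin⟩ := PySem.Chars.find_spec hnn
  constructor
  · rw [List.cons_prefix_iff] at hpre
    obtain ⟨t, ht, -⟩ := hpre
    rw [← List.head?_drop, ht]; rfl
  · intro i hi hget
    apply hmin i hi
    rw [List.cons_prefix_iff]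
    have : (cs.drop i).head? = some c := by rw [List.head?_drop]; exact hget
    obtain ⟨x, t, hxt⟩ : ∃ x t, cs.drop i = x :: t := by
      cases hd : cs.drop i with
      | nil => rw [hd] at this; simp at this
      | cons x t => exact ⟨x, t, rfl⟩
    rw [hxt] at this ⊢
    simp at this
    exact ⟨t, by rw [this], List.nil_prefix⟩

lemma pv_find_char_none (cs : List Char) (c : Char)
    (h : PySem.Chars.find cs [c] = -1) : c ∉ cs := by
  have := (PySem.Chars.find_eq_neg_one_iff cs [c]).mp h
  intro hmem
  exact this ((List.singleton_infix_iff c cs).mpr hmem)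

-- A's scan steps over a brace-free prefix without changing the depth.
lemma pvALoop_skip (p : List Char) (cs : List Char) (d : Int) (hd : 0 < d)
    (hp : ∀ x ∈ p, x ≠ '{' ∧ x ≠ '}') :
    pvALoop (p ++ cs) d = pvALoop cs d := by
  induction p with
  | nil => rfl
  | cons c rest ih =>
      have hc := hp c (by simp)
      rw [List.cons_append, pvALoop, if_neg (by omega)]
      simp only [if_neg hc.1, if_neg hc.2]
      exact ih (fun x hx => hp x (by simp [hx]))

lemma pvALoop_open (rest : List Char) (d : Int) (hd : 0 < d) :
    pvALoop ('{' :: rest) d = pvALoop rest (d + 1) := by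
  rw [pvALoop, if_neg (by omega)]; simp

lemma pvALoop_close (rest : List Char) (d : Int) (hd : 0 < d) :
    pvALoop ('}' :: rest) d = pvALoop rest (d - 1) := by
  rw [pvALoop, if_neg (by omega)]
  simp [(by decide : ('}' : Char) ≠ '{')]

-- With no '}' left, A's depth never comes back down to 0.
lemma pvALoop_no_close (cs : List Char) (d : Int) (hd : 0 < d) (h : '}' ∉ cs) :
    0 < (pvALoop cs d).1 := by
  induction cs generalizing d with
  | nil => rw [pvALoop, if_neg (by omega)]; exact hd
  | cons c rest ih =>
      rw [pvALoop, if_neg (by omega)]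
      have hc : c ≠ '}' := fun hc => h (by simp [hc])
      by_cases ho : c = '{'
      · simp only [if_pos ho]
        exact ih (d + 1) (by omega) (fun hm => h (List.mem_cons_of_mem _ hm))
      · simp only [if_neg ho, if_neg hc]
        exact ih d hd (fun hm => h (List.mem_cons_of_mem _ hm))

-- The main loop equivalence: B's find-jump loop computes exactly A's scan result.
lemma pv_loop_equiv (cs : List Char) (d : Int) (hd : 0 ≤ d) :
    pvBLoop cs d = if (pvALoop cs d).1 = 0 then some (pvALoop cs d).2 else none := by
  by_cases h0 : d ≤ 0
  · have hd0 : d = 0 := le_antisymm h0 hd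
    subst hd0
    rw [pvBLoop, if_pos (by omega)]
    have hA0 : pvALoop cs 0 = (0, cs) := by rw [pvALoop.eq_def]; simp
    rw [hA0]
    simp
  · have hdpos : 0 < d := by omega
    rw [pvBLoop, if_neg h0]
    simp only
    by_cases hc : PySem.Chars.find cs ['}'] = -1
    · rw [dif_pos hc]
      have := pvALoop_no_close cs d hdpos (pv_find_char_none cs '}' hc)
      rw [if_neg (by omega)]
    · rw [dif_neg hc]
      obtain ⟨hck, hcmin⟩ := pv_find_char_spec cs '}' hc
      set nc := PySem.Chars.find cs ['}'] with hnc
      have hncnn : 0 ≤ nc := by have := PySem.Chars.neg_one_le_find cs ['}']; omega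
      have hklen : nc.toNat < cs.length := by
        by_contra hl
        rw [List.getElem?_eq_none (by omega)] at hck
        simp at hck
      by_cases hop : PySem.Chars.find cs ['{'] ≠ -1 ∧ PySem.Chars.find cs ['{'] < nc
      · rw [if_pos hop]
        obtain ⟨hok, homin⟩ := pv_find_char_spec cs '{' hop.1
        set no := PySem.Chars.find cs ['{'] with hno
        have honn : 0 ≤ no := by have := PySem.Chars.neg_one_le_find cs ['{']; omega
        have hjk : no.toNat < nc.toNat := by omega
        have hjlen : no.toNat < cs.length := by omega
        -- decompose cs at the first '{'
        have hdecomp : cs = cs.take no.toNat ++ '{' :: cs.drop (no.toNat + 1) := by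
          have hg : cs[no.toNat] = '{' := by
            have h' := hok
            rwa [List.getElem?_eq_getElem hjlen, Option.some_inj] at h'
          conv_lhs => rw [← List.take_append_drop no.toNat cs,
            List.drop_eq_getElem_cons hjlen, hg]
        have hpre : ∀ x ∈ cs.take no.toNat, x ≠ '{' ∧ x ≠ '}' := by
          intro x hx
          rw [List.mem_take_iff_getElem] at hx
          obtain ⟨i, hi, rfl⟩ := hx
          have hilen : i < cs.length := by omega
          have hgi : cs[i]? = some cs[i] := List.getElem?_eq_getElem hilen
          constructor
          · intro hxo
            exact homin i (by omega) (by rw [hgi, hxo])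
          · intro hxc
            exact hcmin i (by omega) (by rw [hgi, hxc])
        have hA : pvALoop cs d = pvALoop (cs.drop (no.toNat + 1)) (d + 1) := by
          conv_lhs => rw [hdecomp]
          rw [pvALoop_skip _ _ d hdpos hpre, pvALoop_open _ _ hdpos]
        rw [hA, pv_loop_equiv (cs.drop (no.toNat + 1)) (d + 1) (by omega)]
      · rw [if_neg hop]
        -- first brace is the '}' at nc.toNat: no '{' strictly before it
        have hpre : ∀ x ∈ cs.take nc.toNat, x ≠ '{' ∧ x ≠ '}' := by
          intro x hx
          rw [List.mem_take_iff_getElem] at hx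
          obtain ⟨i, hi, rfl⟩ := hx
          have hilen : i < cs.length := by omega
          have hgi : cs[i]? = some cs[i] := List.getElem?_eq_getElem hilen
          constructor
          · intro hxo
            by_cases hno1 : PySem.Chars.find cs ['{'] = -1
            · exact (pv_find_char_none cs '{' hno1) (hxo ▸ List.getElem_mem hilen)
            · obtain ⟨hok, homin⟩ := pv_find_char_spec cs '{' hno1
              set no := PySem.Chars.find cs ['{'] with hno
              have honn : 0 ≤ no := by have := PySem.Chars.neg_one_le_find cs ['{']; omega
              have hge : nc ≤ no := by
                by_contra hlt; exact hop ⟨hno1, by omega⟩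
              -- i < nc.toNat ≤ no.toNat, so cs[i] ≠ '{' by minimality of no
              exact homin i (by omega) (by rw [hgi, hxo])
          · intro hxc
            exact hcmin i (by omega) (by rw [hgi, hxc])
        have hA : pvALoop cs d = pvALoop (cs.drop (nc.toNat + 1)) (d - 1) := by
          have hg : cs[nc.toNat] = '}' := by
            have h' := hck
            rwa [List.getElem?_eq_getElem hklen, Option.some_inj] at h'
          conv_lhs => rw [← List.take_append_drop nc.toNat cs,
            List.drop_eq_getElem_cons hklen, hg]
          rw [pvALoop_skip _ _ d hdpos hpre, pvALoop_close _ _ hdpos]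
        rw [hA, pv_loop_equiv (cs.drop (nc.toNat + 1)) (d - 1) (by omega)]
termination_by cs.length
decreasing_by
  · simp only [List.length_drop]; omega
  · simp only [List.length_drop]; omega

-- ===== VERDICT (by name: the statement is the Claim_ definition above) =====
theorem replace_federated_service_call_spec : Claim_equal_replace_federated_service_call := by
  intro s r _
  unfold Spec_replace_federated_service_call
  unfold replace_federated_service_call replace_federated_service_call_alt
  simp only
  by_cases h1 : PySem.Chars.find s.toList pvTag = -1
  · rw [if_pos h1, if_pos h1]
  · rw [if_neg h1, if_neg h1]
    by_cases h2 : PySem.Chars.findFrom s.toList ['{'] (PySem.Chars.find s.toList pvTag) = -1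
    · rw [if_pos h2, if_pos h2]
    · rw [if_neg h2, if_neg h2]
      rw [pv_loop_equiv _ 1 (by norm_num)]
      by_cases h3 : (pvALoop (s.toList.drop ((PySem.Chars.findFrom s.toList ['{'] (PySem.Chars.find s.toList pvTag)).toNat + 1)) 1).1 = 0
      · rw [if_pos h3]; simp [h3]
      · rw [if_neg h3]; simp [h3]
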